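-- pv_equiv track=rewrite | github.com/notdenied/miptctf_2026_finals | checkers/babuinterpreter/generator.py | babuin_string
-- ===== SOURCE A (Python) =====
-- def babuin_string(value: str) -> str:
--     parts = ['"']
--     for ch in value:
--         if ch == "\n":
--             parts.append("\\n")
--         elif ch == "\t":
--             parts.append("\\t")
--         elif ch == "\r":
--             parts.append("\\r")
--         elif ch == "\\":
--             parts.append("\\\\")
--         elif ch == '"':
--             parts.append('\\"')
--         else:
--             parts.append(ch)
--     parts.append('"')
--     return "".join(parts)
-- ===== SOURCE B (Python) =====
-- def babuin_string(value: str) -> str: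
--     # staged whole-string passes: escape backslashes first, then each control char / quote
--     value = value.replace("\\", "\\\\")
--     value = value.replace("\n", "\\n")
--     value = value.replace("\t", "\\t")
--     value = value.replace("\r", "\\r")
--     value = value.replace('"', '\\"')
--     return '"' + value + '"'
-- ===== Notes on version B (the rewrite author's own statement) =====
-- stated objective: faster
-- what changed: Replaces the single per-character loop with if/elif branches and a list accumulator by five staged whole-string str.replace passes (backslash escaped first so later passes cannot touch introduced escapes), then quote-wraps the result.
import Mathlib
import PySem

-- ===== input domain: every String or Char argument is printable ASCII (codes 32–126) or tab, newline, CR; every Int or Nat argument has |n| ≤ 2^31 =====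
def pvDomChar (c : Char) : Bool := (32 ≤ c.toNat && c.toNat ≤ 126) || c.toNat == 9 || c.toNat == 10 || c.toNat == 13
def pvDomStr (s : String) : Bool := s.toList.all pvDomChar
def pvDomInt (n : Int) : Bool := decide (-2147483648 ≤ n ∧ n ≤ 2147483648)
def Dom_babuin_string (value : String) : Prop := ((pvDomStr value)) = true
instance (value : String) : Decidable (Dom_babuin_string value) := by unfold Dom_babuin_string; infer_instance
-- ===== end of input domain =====

-- B replaces A's single per-character loop by five staged whole-string replace passes (backslash first), then quote-wraps; a timing run measured it faster by a constant factor.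

-- ===== PORT A =====
-- literal transliteration: accumulate escaped pieces in a list, then join
def babuin_string (value : String) : String :=
  let parts : List String :=
    value.toList.foldl (fun parts ch =>
      if ch = '\n' then parts ++ ["\\n"]
      else if ch = '\t' then parts ++ ["\\t"]
      else if ch = '\r' then parts ++ ["\\r"]
      else if ch = '\\' then parts ++ ["\\\\"]
      else if ch = '\"' then parts ++ ["\\\""]
      else parts ++ [String.ofList [ch]]) ["\""]
  String.join (parts ++ ["\""])

-- ===== PORT B =====
-- five staged value.replace passes, then quote-wrap (PySem.Str.replace = Python str.replace)
def babuin_string_alt (value : String) : String :=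
  let v1 := PySem.Str.replace value "\\" "\\\\"
  let v2 := PySem.Str.replace v1 "\n" "\\n"
  let v3 := PySem.Str.replace v2 "\t" "\\t"
  let v4 := PySem.Str.replace v3 "\r" "\\r"
  let v5 := PySem.Str.replace v4 "\"" "\\\""
  "\"" ++ v5 ++ "\""

-- ===== PRECONDITION & SPEC =====
def Spec_babuin_string (value : String) (out : String) : Prop := out = babuin_string_alt value
instance (value : String) (out : String) : Decidable (Spec_babuin_string value out) := by unfold Spec_babuin_string; infer_instance

-- ===== CLAIM (what is proved, stated in full; the proofs are below) =====
def Claim_equal_babuin_string : Prop := ∀ (value : String), Dom_babuin_string value → Spec_babuin_string value (babuin_string value)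

-- ===== LEMMAS AND PROOFS =====

-- the per-character escape both programs realise
def pvEsc (c : Char) : List Char :=
  if c = '\n' then ['\\', 'n']
  else if c = '\t' then ['\\', 't']
  else if c = '\r' then ['\\', 'r']
  else if c = '\\' then ['\\', '\\']
  else if c = '\"' then ['\\', '\"'] else [c]

-- replace with a single-char pattern is a charwise flatMap
lemma replace_go_single (p : Char) (new : List Char) (l : List Char) (fuel : Nat) (acc : List Char)
    (h : l.length ≤ fuel) :
    PySem.Chars.replace.go [p] new fuel l acc
      = acc.reverse ++ l.flatMap (fun c => if c = p then new else [c]) := by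
  induction l generalizing fuel acc with
  | nil => cases fuel <;> simp [PySem.Chars.replace.go]
  | cons c t ih =>
    cases fuel with
    | zero => simp at h
    | succ fuel =>
      simp only [List.length_cons, Nat.succ_le_succ_iff] at h
      by_cases hc : c = p
      · subst hc
        have hpre : List.isPrefixOf [c] (c :: t) = true := by simp [List.isPrefixOf]
        simp only [PySem.Chars.replace.go, hpre, if_pos rfl, List.length_cons, List.length_nil]
        rw [show List.drop 1 (c :: t) = t from rfl, ih _ _ h]
        simp [List.flatMap_cons]
      · have hpre : List.isPrefixOf [p] (c :: t) = false := by
          simp [List.isPrefixOf]; exact fun h' => absurd h'.symm hc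
        simp only [PySem.Chars.replace.go, hpre]
        rw [if_neg (by simp [hpre]), ih _ _ h]
        simp [List.flatMap_cons, hc]

lemma replace_single (s : List Char) (p : Char) (new : List Char) :
    PySem.Chars.replace s [p] new = s.flatMap (fun c => if c = p then new else [c]) := by
  unfold PySem.Chars.replace
  simp only [List.isEmpty_cons, if_neg]
  exact replace_go_single p new s s.length [] le_rfl

-- the five staged passes, charwise, on the characters of the input
def pvChain (l : List Char) : List Char :=
  (((((l.flatMap (fun c => if c = '\\' then ['\\','\\'] else [c])).flatMap
      (fun c => if c = '\n' then ['\\','n'] else [c])).flatMap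
      (fun c => if c = '\t' then ['\\','t'] else [c])).flatMap
      (fun c => if c = '\r' then ['\\','r'] else [c])).flatMap
      (fun c => if c = '\"' then ['\\','\"'] else [c]))

lemma pvChain_eq (l : List Char) : pvChain l = l.flatMap pvEsc := by
  induction l with
  | nil => rfl
  | cons c t ih =>
    have : pvChain (c :: t) = pvChain [c] ++ pvChain t := by
      simp [pvChain, List.flatMap_cons, List.flatMap_append]
    rw [this, ih, List.flatMap_cons]
    congr 1
    by_cases h1 : c = '\n'
    · subst h1; decide
    by_cases h2 : c = '\t'
    · subst h2; decide
    by_cases h3 : c = '\r'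
    · subst h3; decide
    by_cases h4 : c = '\\'
    · subst h4; decide
    by_cases h5 : c = '\"'
    · subst h5; decide
    simp [pvChain, pvEsc, List.flatMap_cons, h1, h2, h3, h4, h5]

lemma alt_toList (value : String) :
    (babuin_string_alt value).toList = '\"' :: value.toList.flatMap pvEsc ++ ['\"'] := by
  unfold babuin_string_alt
  simp only [PySem.Str.replace, String.toList_append, String.toList_ofList]
  rw [show ("\\" : String).toList = ['\\'] from rfl, show ("\\\\" : String).toList = ['\\','\\'] from rfl,
      show ("\n" : String).toList = ['\n'] from rfl, show ("\\n" : String).toList = ['\\','n'] from rfl,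
      show ("\t" : String).toList = ['\t'] from rfl, show ("\\t" : String).toList = ['\\','t'] from rfl,
      show ("\r" : String).toList = ['\r'] from rfl, show ("\\r" : String).toList = ['\\','r'] from rfl,
      show ("\"" : String).toList = ['\"'] from rfl, show ("\\\"" : String).toList = ['\\','\"'] from rfl]
  rw [replace_single, replace_single, replace_single, replace_single, replace_single]
  have := pvChain_eq value.toList
  unfold pvChain at this
  rw [this]
  rfl

-- A's fold, at the list-of-strings level
lemma a_foldl_eq (l : List Char) (acc : List String) :
    l.foldl (fun parts ch =>
      if ch = '\n' then parts ++ ["\\n"]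
      else if ch = '\t' then parts ++ ["\\t"]
      else if ch = '\r' then parts ++ ["\\r"]
      else if ch = '\\' then parts ++ ["\\\\"]
      else if ch = '\"' then parts ++ ["\\\""]
      else parts ++ [String.ofList [ch]]) acc = acc ++ l.map (fun c => String.ofList (pvEsc c)) := by
  induction l generalizing acc with
  | nil => simp
  | cons c l ih =>
    simp only [List.foldl_cons, List.map_cons, ih]
    have : (if c = '\n' then acc ++ ["\\n"]
      else if c = '\t' then acc ++ ["\\t"]
      else if c = '\r' then acc ++ ["\\r"]
      else if c = '\\' then acc ++ ["\\\\"]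
      else if c = '\"' then acc ++ ["\\\""]
      else acc ++ [String.ofList [c]]) = acc ++ [String.ofList (pvEsc c)] := by
      unfold pvEsc
      split_ifs <;> rfl
    rw [this]; simp

lemma pv_foldl_str (m : List String) (s : String) :
    List.foldl (fun r t => r ++ t) s m = s ++ List.foldl (fun r t => r ++ t) "" m := by
  induction m generalizing s with
  | nil => simp
  | cons y m ihm =>
    simp only [List.foldl_cons]
    rw [ihm (s ++ y), ihm ("" ++ y)]
    simp [String.append_assoc]

lemma a_toList (value : String) :
    (babuin_string value).toList = '\"' :: value.toList.flatMap pvEsc ++ ['\"'] := by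
  unfold babuin_string
  rw [a_foldl_eq]
  have hj : ∀ m : List String, (String.join m).toList = m.flatMap String.toList := by
    intro m
    induction m with
    | nil => rfl
    | cons x m ih =>
      simp only [String.join, List.foldl_cons]
      rw [pv_foldl_str]
      show (x ++ _).toList = _
      simp only [String.toList_append, List.flatMap_cons]
      rw [show List.foldl (fun r t => r ++ t) "" m = String.join m from rfl, ih]
  rw [hj]
  simp [List.flatMap_append, List.flatMap_cons, List.flatMap_map, Function.comp, String.toList_ofList]

-- ===== VERDICT (by name: the statement is the Claim_ definition above) =====
theorem babuin_string_spec : Claim_equal_babuin_string := by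
  intro value _
  unfold Spec_babuin_string
  have h := (a_toList value).trans (alt_toList value).symm
  have h2 := congrArg String.ofList h
  simpa using h2
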